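-- pv_equiv track=rewrite | github.com/HanselGray/optimization-2d-bin-packing | Guillotine.py | best_score_remaining_area
-- ===== SOURCE A (Python) =====
-- def best_score_remaining_area(remaining_area, trucks):
--     best_score = trucks[0][0]*trucks[0][1]-remaining_area
--     best_id = 0
--     for i in range(1,len(trucks)):
--         tmp= trucks[i][0]*trucks[i][1]-remaining_area
--         if best_score > tmp:
--             best_id = i
--             best_score = tmp
--         elif best_score == tmp:
--             if trucks[i][2] > trucks[best_id][2]: best_id=i
--
--     return best_id
-- ===== SOURCE B (Python) =====
-- def best_score_remaining_area(remaining_area, trucks):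
--     # Two-pass: first find the minimum area, then pick the earliest truck with
--     # that area whose third component is maximal among them.
--     min_area = min(w * h for w, h, _ in trucks)
--     best_id = None
--     for i, (w, h, z) in enumerate(trucks):
--         if w * h == min_area and (best_id is None or z > trucks[best_id][2]):
--             best_id = i
--     return best_id
-- ===== Notes on version B (the rewrite author's own statement) =====
-- stated objective: alternative
-- what changed: Replaces A's single fused scan that maintains a running best score with tie-breaking by a two-pass decomposition: first compute the minimum truck area, then a separate selection pass picks the earliest truck of that area with maximal third component.
-- outside the precondition, e.g. on best_score_remaining_area(0, []): A raises IndexError, B raises ValueError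
import Mathlib
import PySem

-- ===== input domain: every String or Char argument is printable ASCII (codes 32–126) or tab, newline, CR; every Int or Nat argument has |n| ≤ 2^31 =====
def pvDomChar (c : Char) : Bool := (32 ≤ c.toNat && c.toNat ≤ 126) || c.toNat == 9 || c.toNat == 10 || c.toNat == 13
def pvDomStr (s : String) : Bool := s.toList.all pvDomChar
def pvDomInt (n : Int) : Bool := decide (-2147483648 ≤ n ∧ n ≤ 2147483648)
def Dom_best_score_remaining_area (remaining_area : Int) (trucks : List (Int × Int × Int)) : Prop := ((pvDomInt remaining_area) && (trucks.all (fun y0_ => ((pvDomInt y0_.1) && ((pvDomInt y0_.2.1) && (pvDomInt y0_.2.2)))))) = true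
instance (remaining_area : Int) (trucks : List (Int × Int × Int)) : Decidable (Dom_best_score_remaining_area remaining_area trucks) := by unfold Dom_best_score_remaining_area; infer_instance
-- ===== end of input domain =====

-- B replaces A's fused running-argmin-with-tiebreak scan by two passes: first compute the
-- minimum area, then select the earliest truck of that area with maximal third component
-- (objective: alternative decomposition, same cost).

-- ===== PORT A =====
-- literal transliteration of A; trucks[0] raises IndexError on [] (excluded by Pre_),
-- pyGetD is exact for the loop indices, which are always in range
def best_score_remaining_area (remaining_area : Int) (trucks : List (Int × Int × Int)) : Int :=
  ((PySem.List.pyRange 1 (trucks.length : Int) 1).foldl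
    (fun (st : Int × Int) i =>
      if st.1 > (PySem.List.pyGetD trucks i (0, 0, 0)).1 * (PySem.List.pyGetD trucks i (0, 0, 0)).2.1 - remaining_area then
        ((PySem.List.pyGetD trucks i (0, 0, 0)).1 * (PySem.List.pyGetD trucks i (0, 0, 0)).2.1 - remaining_area, i)
      else if st.1 = (PySem.List.pyGetD trucks i (0, 0, 0)).1 * (PySem.List.pyGetD trucks i (0, 0, 0)).2.1 - remaining_area then
        if (PySem.List.pyGetD trucks i (0, 0, 0)).2.2 > (PySem.List.pyGetD trucks st.2 (0, 0, 0)).2.2 then (st.1, i) else st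
      else st)
    ((PySem.List.pyGetD trucks 0 (0, 0, 0)).1 * (PySem.List.pyGetD trucks 0 (0, 0, 0)).2.1 - remaining_area, (0 : Int))).2

-- ===== PORT B =====
-- transliteration of Source B; min() raises ValueError on [] (excluded by Pre_), so the
-- .getD 0 on the two Option results is a total stand-in never reached under Pre_
-- loop body of Source B's selection pass ('if w*h == min_area and (best_id is None or z > trucks[best_id][2])')
def pvBStep (min_area : Int) (trucks : List (Int × Int × Int)) (b : Option Int) (p : Int × (Int × Int × Int)) : Option Int :=
  if p.2.1 * p.2.2.1 = min_area then
    match b with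
    | none => some p.1
    | some j => if p.2.2.2 > (PySem.List.pyGetD trucks j (0, 0, 0)).2.2 then some p.1 else b
  else b

def best_score_remaining_area_alt (remaining_area : Int) (trucks : List (Int × Int × Int)) : Int :=
  let min_area := (PySem.List.min? (trucks.map (fun t => t.1 * t.2.1)) (fun a => a)).getD 0
  (((PySem.List.enumerate trucks).foldl (pvBStep min_area trucks) none).getD 0)

-- ===== PRECONDITION & SPEC =====
-- A evaluates trucks[0] first, so it raises IndexError on an empty truck list: excluded.
def Pre_best_score_remaining_area (remaining_area : Int) (trucks : List (Int × Int × Int)) : Prop := trucks ≠ []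
instance (remaining_area : Int) (trucks : List (Int × Int × Int)) : Decidable (Pre_best_score_remaining_area remaining_area trucks) := by unfold Pre_best_score_remaining_area; infer_instance
def pvWitness_best_score_remaining_area : Int × (List (Int × Int × Int)) := (3, [(2, 2, 1), (1, 3, 5)])

def Spec_best_score_remaining_area (remaining_area : Int) (trucks : List (Int × Int × Int)) (out : Int) : Prop := out = best_score_remaining_area_alt remaining_area trucks
instance (remaining_area : Int) (trucks : List (Int × Int × Int)) (out : Int) : Decidable (Spec_best_score_remaining_area remaining_area trucks out) := by unfold Spec_best_score_remaining_area; infer_instance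

-- ===== CLAIM (what is proved, stated in full; the proofs are below) =====
def Claim_equal_best_score_remaining_area : Prop := ∀ (remaining_area : Int) (trucks : List (Int × Int × Int)), Dom_best_score_remaining_area remaining_area trucks → Pre_best_score_remaining_area remaining_area trucks → Spec_best_score_remaining_area remaining_area trucks (best_score_remaining_area remaining_area trucks)

-- ===== LEMMAS AND PROOFS =====

-- area and third component of trucks[i]
def pvAr (T : List (Int × Int × Int)) (i : Nat) : Int := (T.getD i (0, 0, 0)).1 * (T.getD i (0, 0, 0)).2.1
def pvZ (T : List (Int × Int × Int)) (i : Nat) : Int := (T.getD i (0, 0, 0)).2.2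

-- A's running best index over the prefix [0..k]
def pvSb (T : List (Int × Int × Int)) : Nat → Nat
  | 0 => 0
  | k+1 =>
    if pvAr T (k+1) < pvAr T (pvSb T k) then k+1
    else if pvAr T (k+1) = pvAr T (pvSb T k) ∧ pvZ T (pvSb T k) < pvZ T (k+1) then k+1
    else pvSb T k

-- B's running state: earliest max-z index among entries of area m seen so far
def pvSB (T : List (Int × Int × Int)) (m : Int) : Nat → Option Nat
  | 0 => none
  | k+1 =>
    if pvAr T k = m then
      some ((pvSB T m k).elim k (fun j => if pvZ T j < pvZ T k then k else j))
    else pvSB T m k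

lemma pvSb_succ (T : List (Int × Int × Int)) (k : Nat) :
    pvSb T (k+1) =
      if pvAr T (k+1) < pvAr T (pvSb T k) then k+1
      else if pvAr T (k+1) = pvAr T (pvSb T k) ∧ pvZ T (pvSb T k) < pvZ T (k+1) then k+1
      else pvSb T k := rfl

lemma pvSB_succ (T : List (Int × Int × Int)) (m : Int) (k : Nat) :
    pvSB T m (k+1) =
      if pvAr T k = m then
        some ((pvSB T m k).elim k (fun j => if pvZ T j < pvZ T k then k else j))
      else pvSB T m k := rfl

lemma pvSb_le (T : List (Int × Int × Int)) (k : Nat) : pvSb T k ≤ k := by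
  induction k with
  | zero => simp [pvSb]
  | succ k ih => rw [pvSb_succ]; split_ifs <;> omega

lemma pvSb_min (T : List (Int × Int × Int)) (k : Nat) : ∀ i, i ≤ k → pvAr T (pvSb T k) ≤ pvAr T i := by
  induction k with
  | zero =>
    intro i hi
    have : i = 0 := Nat.le_zero.mp hi
    subst this; simp [pvSb]
  | succ k ih =>
    intro i hi
    rw [pvSb_succ]
    split_ifs with h1 h2
    · by_cases hik : i ≤ k
      · exact le_of_lt (lt_of_lt_of_le h1 (ih i hik))
      · have : i = k+1 := by omega
        subst this; exact le_refl _
    · by_cases hik : i ≤ k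
      · calc pvAr T (k+1) = pvAr T (pvSb T k) := h2.1
          _ ≤ pvAr T i := ih i hik
      · have : i = k+1 := by omega
        subst this; exact le_refl _
    · by_cases hik : i ≤ k
      · exact ih i hik
      · have : i = k+1 := by omega
        subst this
        exact le_of_not_gt h1

lemma pvA_loop (T : List (Int × Int × Int)) (r : Int) (k : Nat) :
    List.foldl
      (fun (st : Int × Int) i =>
        if st.1 > (PySem.List.pyGetD T i (0, 0, 0)).1 * (PySem.List.pyGetD T i (0, 0, 0)).2.1 - r then
          ((PySem.List.pyGetD T i (0, 0, 0)).1 * (PySem.List.pyGetD T i (0, 0, 0)).2.1 - r, i)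
        else if st.1 = (PySem.List.pyGetD T i (0, 0, 0)).1 * (PySem.List.pyGetD T i (0, 0, 0)).2.1 - r then
          if (PySem.List.pyGetD T i (0, 0, 0)).2.2 > (PySem.List.pyGetD T st.2 (0, 0, 0)).2.2 then (st.1, i) else st
        else st)
      ((PySem.List.pyGetD T 0 (0, 0, 0)).1 * (PySem.List.pyGetD T 0 (0, 0, 0)).2.1 - r, (0 : Int))
      (PySem.List.pyRange 1 ((k : Int) + 1) 1)
    = (pvAr T (pvSb T k) - r, ((pvSb T k : Nat) : Int)) := by
  induction k with
  | zero =>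
    rw [show ((0 : Nat) : Int) + 1 = 1 by norm_num, PySem.List.pyRange_one_eq_nil (le_refl 1)]
    simp [pvSb, pvAr, PySem.List.pyGetD_zero]
  | succ k ih =>
    rw [show ((k+1 : Nat) : Int) + 1 = ((k : Int) + 1) + 1 by push_cast; ring]
    rw [PySem.List.pyRange_one_succ_right (by omega : (1 : Int) ≤ (k : Int) + 1)]
    rw [List.foldl_append, ih]
    simp only [List.foldl_cons, List.foldl_nil]
    rw [show ((k : Int) + 1) = ((k+1 : Nat) : Int) by push_cast; ring]
    simp only [PySem.List.pyGetD_natCast]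
    have hAr : ∀ i : Nat, (T.getD i ((0 : Int), (0 : Int), (0 : Int))).1 * (T.getD i ((0 : Int), (0 : Int), (0 : Int))).2.1 = pvAr T i := fun _ => rfl
    have hZ : ∀ i : Nat, (T.getD i ((0 : Int), (0 : Int), (0 : Int))).2.2 = pvZ T i := fun _ => rfl
    simp only [hAr, hZ, gt_iff_lt]
    rw [pvSb_succ]
    by_cases h1 : pvAr T (k+1) < pvAr T (pvSb T k)
    · rw [if_pos (show pvAr T (k+1) - r < pvAr T (pvSb T k) - r by omega), if_pos h1]
    · rw [if_neg (show ¬ pvAr T (k+1) - r < pvAr T (pvSb T k) - r by omega), if_neg h1]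
      by_cases h2 : pvAr T (k+1) = pvAr T (pvSb T k)
      · rw [if_pos (show pvAr T (pvSb T k) - r = pvAr T (k+1) - r by omega)]
        by_cases h3 : pvZ T (pvSb T k) < pvZ T (k+1)
        · have hconj : pvAr T (k+1) = pvAr T (pvSb T k) ∧ pvZ T (pvSb T k) < pvZ T (k+1) := ⟨h2, h3⟩
          rw [if_pos h3, if_pos hconj]
          simp [h2]
        · have hconj : ¬ (pvAr T (k+1) = pvAr T (pvSb T k) ∧ pvZ T (pvSb T k) < pvZ T (k+1)) := by tauto
          rw [if_neg h3, if_neg hconj]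
      · have hconj : ¬ (pvAr T (k+1) = pvAr T (pvSb T k) ∧ pvZ T (pvSb T k) < pvZ T (k+1)) := by tauto
        rw [if_neg (show ¬ pvAr T (pvSb T k) - r = pvAr T (k+1) - r by omega), if_neg hconj]

lemma pvB_loop (T : List (Int × Int × Int)) (m : Int) (k : Nat) :
    List.foldl (pvBStep m T) none
      ((PySem.List.pyRange 0 (k : Int) 1).map (fun j => (j, PySem.List.pyGetD T j ((0 : Int), (0 : Int), (0 : Int)))))
    = (pvSB T m k).map (fun n => ((n : Nat) : Int)) := by
  induction k with
  | zero =>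
    rw [show ((0 : Nat) : Int) = 0 by norm_num, PySem.List.pyRange_one_eq_nil (le_refl 0)]
    simp [pvSB]
  | succ k ih =>
    rw [show ((k+1 : Nat) : Int) = (k : Int) + 1 by push_cast; ring]
    rw [PySem.List.pyRange_one_succ_right (by omega : (0 : Int) ≤ (k : Int))]
    rw [List.map_append, List.foldl_append, ih]
    simp only [List.map_cons, List.map_nil, List.foldl_cons, List.foldl_nil]
    simp only [pvBStep, PySem.List.pyGetD_natCast]
    have hAr : ∀ i : Nat, (T.getD i ((0 : Int), (0 : Int), (0 : Int))).1 * (T.getD i ((0 : Int), (0 : Int), (0 : Int))).2.1 = pvAr T i := fun _ => rfl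
    have hZ : ∀ i : Nat, (T.getD i ((0 : Int), (0 : Int), (0 : Int))).2.2 = pvZ T i := fun _ => rfl
    simp only [hAr, hZ, gt_iff_lt]
    rw [pvSB_succ]
    by_cases h : pvAr T k = m
    · rw [if_pos h, if_pos h]
      cases hsb : pvSB T m k with
      | none => simp
      | some j =>
        have hZ' : ∀ i : Nat, ((T[i]?).getD ((0 : Int), (0 : Int), (0 : Int))).2.2 = pvZ T i := fun _ => rfl
        simp only [Option.map_some, Option.elim_some]
        by_cases hz : pvZ T j < pvZ T k
        · simp [PySem.List.pyGetD_natCast, hZ', hz]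
        · simp [PySem.List.pyGetD_natCast, hZ', hz]
    · rw [if_neg h, if_neg h]

lemma pvLink (T : List (Int × Int × Int)) (m : Int)
    (hm : ∀ i, i < T.length → m ≤ pvAr T i) :
    ∀ k, k < T.length →
      (pvAr T (pvSb T k) = m → pvSB T m (k+1) = some (pvSb T k)) ∧
      (pvAr T (pvSb T k) ≠ m → pvSB T m (k+1) = none) := by
  intro k
  induction k with
  | zero =>
    intro _
    constructor
    · intro h0
      have h0' : pvAr T 0 = m := h0
      rw [pvSB_succ, if_pos h0']
      simp [pvSB, pvSb]
    · intro h0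
      have h0' : ¬ pvAr T 0 = m := h0
      rw [pvSB_succ, if_neg h0']
      simp [pvSB]
  | succ k ih =>
    intro hk
    have hk' : k < T.length := by omega
    obtain ⟨ih1, ih2⟩ := ih hk'
    have hmk1 : m ≤ pvAr T (k+1) := hm _ hk
    have hmsb : m ≤ pvAr T (pvSb T k) := hm _ (by have := pvSb_le T k; omega)
    rw [pvSb_succ, pvSB_succ T m (k+1)]
    by_cases hc1 : pvAr T (k+1) = m <;> by_cases hc2 : pvAr T (pvSb T k) = m
    · have hlt : ¬ pvAr T (k+1) < pvAr T (pvSb T k) := by omega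
      have heq : pvAr T (k+1) = pvAr T (pvSb T k) := by omega
      rw [if_neg hlt, if_pos hc1, ih1 hc2]
      by_cases hz : pvZ T (pvSb T k) < pvZ T (k+1)
      · rw [if_pos ⟨heq, hz⟩]
        exact ⟨fun _ => by simp [hz], fun hne => absurd hc1 hne⟩
      · rw [if_neg (fun hc => hz hc.2)]
        exact ⟨fun _ => by simp [hz], fun hne => absurd hc2 hne⟩
    · have hlt : pvAr T (k+1) < pvAr T (pvSb T k) := by omega
      rw [if_pos hlt, if_pos hc1, ih2 hc2]
      exact ⟨fun _ => by simp, fun hne => absurd hc1 hne⟩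
    · have h1 : ¬ pvAr T (k+1) < pvAr T (pvSb T k) := by omega
      have h2 : ¬ (pvAr T (k+1) = pvAr T (pvSb T k) ∧ pvZ T (pvSb T k) < pvZ T (k+1)) :=
        fun hc => hc1 (hc.1.trans hc2)
      rw [if_neg h1, if_neg h2, if_neg hc1, ih1 hc2]
      exact ⟨fun _ => rfl, fun hne => absurd hc2 hne⟩
    · rw [if_neg hc1, ih2 hc2]
      refine ⟨fun habs => ?_, fun _ => rfl⟩
      exfalso
      by_cases hlt : pvAr T (k+1) < pvAr T (pvSb T k)
      · rw [if_pos hlt] at habs; exact hc1 habs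
      · rw [if_neg hlt] at habs
        by_cases hq : pvAr T (k+1) = pvAr T (pvSb T k) ∧ pvZ T (pvSb T k) < pvZ T (k+1)
        · rw [if_pos hq] at habs; exact hc1 habs
        · rw [if_neg hq] at habs; exact hc2 habs

-- ===== VERDICT (by name: the statement is the Claim_ definition above) =====
theorem best_score_remaining_area_spec : Claim_equal_best_score_remaining_area := by
  intro r T _ hpre
  unfold Spec_best_score_remaining_area
  cases T with
  | nil => exact absurd rfl hpre
  | cons t T' =>
    have hmin : PySem.List.min? ((t :: T').map (fun t => t.1 * t.2.1)) (fun a => a)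
        = some ((T'.map (fun t => t.1 * t.2.1)).foldl min (t.1 * t.2.1)) := by
      rw [List.map_cons, PySem.List.min?_id_cons]
    set m := (T'.map (fun t => t.1 * t.2.1)).foldl min (t.1 * t.2.1) with hMdef
    have hmem : m ∈ (t :: T').map (fun t => t.1 * t.2.1) := PySem.List.min?_mem hmin
    have hlow' := PySem.List.min?_isMin hmin
    have hm_low : ∀ i, i < (t :: T').length → m ≤ pvAr (t :: T') i := by
      intro i hi
      have hmem2 : (t :: T')[i].1 * (t :: T')[i].2.1 ∈ (t :: T').map (fun t => t.1 * t.2.1) := by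
        exact List.mem_map_of_mem (List.getElem_mem hi)
      have h := hlow' _ hmem2
      have hgd : ((t :: T').getD i ((0 : Int), (0 : Int), (0 : Int))) = (t :: T')[i] :=
        List.getD_eq_getElem _ _ hi
      have h2 : pvAr (t :: T') i = (t :: T')[i].1 * (t :: T')[i].2.1 := by
        unfold pvAr; rw [hgd]
      rw [h2]
      exact h
    have hatt : ∃ i, ∃ _ : i < (t :: T').length, pvAr (t :: T') i = m := by
      rcases List.mem_map.mp hmem with ⟨x, hx, hxm⟩
      rcases List.getElem_of_mem hx with ⟨i, hi, hix⟩
      refine ⟨i, hi, ?_⟩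
      have hgd : ((t :: T').getD i ((0 : Int), (0 : Int), (0 : Int))) = (t :: T')[i] :=
        List.getD_eq_getElem _ _ hi
      unfold pvAr
      rw [hgd, hix]
      exact hxm
    have hlen : (t :: T').length = T'.length + 1 := by simp
    have hsble : pvSb (t :: T') T'.length ≤ T'.length := pvSb_le _ _
    have har : pvAr (t :: T') (pvSb (t :: T') T'.length) = m := by
      apply le_antisymm
      · rcases hatt with ⟨i, hi, him⟩
        calc pvAr (t :: T') (pvSb (t :: T') T'.length) ≤ pvAr (t :: T') i :=
              pvSb_min _ _ i (by rw [hlen] at hi; omega)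
          _ = m := him
      · exact hm_low _ (by rw [hlen]; omega)
    have hB := (pvLink (t :: T') m hm_low T'.length (by rw [hlen]; omega)).1 har
    have hA : best_score_remaining_area r (t :: T') = ((pvSb (t :: T') T'.length : Nat) : Int) := by
      unfold best_score_remaining_area
      rw [show (((t :: T').length : Nat) : Int) = ((T'.length : Int) + 1) by
        rw [hlen]; push_cast; ring]
      rw [pvA_loop (t :: T') r T'.length]
    have hBv : best_score_remaining_area_alt r (t :: T') = ((pvSb (t :: T') T'.length : Nat) : Int) := by
      unfold best_score_remaining_area_alt
      rw [hmin]
      simp only [Option.getD_some]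
      rw [PySem.List.enumerate_eq_map_pyRange (t :: T') ((0 : Int), (0 : Int), (0 : Int))]
      simp only [PySem.List.len_eq, hlen]
      rw [pvB_loop (t :: T') m (T'.length + 1)]
      rw [hB]
      simp
    rw [hA, hBv]
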